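-- pv_equiv track=rewrite | github.com/solo21-12/A2SV_Progress | contest/A_Thorns_and_Coins.py | solve
-- ===== SOURCE A (Python) =====
-- def solve(paths, n):
--
--     count = 0
--     i = 0
--     for i in range(len(paths) - 1):
--         if paths[i] == '*' and paths[i+1] == "*":
--             return count
--         elif paths[i] == '@':
--             count += 1
--         else:
--             continue
--
--     if paths[-1] == '@':
--         count += 1
--
--     return count
-- ===== SOURCE B (Python) =====
-- def solve(paths, n):
--     idx = paths.find('**')
--     if idx != -1:
--         return paths[:idx].count('@')
--     return paths.count('@')
-- ===== Notes on version B (the rewrite author's own statement) =====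
-- stated objective: simpler
-- what changed: Replaces the manual index scan with early return by locating the first '**' via str.find and counting '@' in the relevant prefix (or the whole string) with str.count, both C-level string primitives.
import Mathlib
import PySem

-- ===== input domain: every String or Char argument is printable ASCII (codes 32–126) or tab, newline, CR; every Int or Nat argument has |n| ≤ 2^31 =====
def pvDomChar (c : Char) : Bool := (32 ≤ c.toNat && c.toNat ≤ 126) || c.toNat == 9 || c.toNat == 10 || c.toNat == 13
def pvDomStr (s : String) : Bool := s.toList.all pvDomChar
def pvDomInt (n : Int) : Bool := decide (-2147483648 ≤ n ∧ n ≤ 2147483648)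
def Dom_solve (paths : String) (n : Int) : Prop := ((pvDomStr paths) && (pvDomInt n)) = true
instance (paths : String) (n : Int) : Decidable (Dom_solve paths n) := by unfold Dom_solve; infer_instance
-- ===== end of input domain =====

-- B locates the first "**" with str.find and counts '@' with str.count instead of A's
-- manual indexed scan with early return; objective: simpler (same O(n) cost).
-- ===== PORT A =====
-- A's for-loop over i in range(len-1): structural recursion on the suffix starting at i;
-- Sum.inl = the early 'return count', Sum.inr = the loop fell through with this count.
def solveGo : List Char → Int → Sum Int Int
  | c1 :: c2 :: rest, count =>
    if c1 = '*' ∧ c2 = '*' then Sum.inl count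
    else if c1 = '@' then solveGo (c2 :: rest) (count + 1)
    else solveGo (c2 :: rest) count
  | _, count => Sum.inr count

def solve (paths : String) (n : Int) : Int :=
  match solveGo paths.toList 0 with
  | Sum.inl count => count
  | Sum.inr count =>
    match PySem.Str.pyGet? paths (-1) with   -- paths[-1]
    | some c => if c = '@' then count + 1 else count
    | none => count   -- Python raises IndexError here (paths = ""); excluded by Pre_solve

-- ===== PORT B =====
def solve_alt (paths : String) (n : Int) : Int :=
  let idx := PySem.Str.find paths "**"
  if idx ≠ -1 then ((PySem.Str.slice paths none (some idx)).toList.count '@' : Int)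
  else ((paths.toList.count '@' : Nat) : Int)

-- ===== PRECONDITION & SPEC =====
-- Pre_ excludes only the empty string, on which A raises IndexError at paths[-1].
def Pre_solve (paths : String) (n : Int) : Prop := paths ≠ ""
instance (paths : String) (n : Int) : Decidable (Pre_solve paths n) := by unfold Pre_solve; infer_instance
def pvWitness_solve : String × Int := ("*@*@", 4)

def Spec_solve (paths : String) (n : Int) (out : Int) : Prop := out = solve_alt paths n
instance (paths : String) (n : Int) (out : Int) : Decidable (Spec_solve paths n out) := by unfold Spec_solve; infer_instance

-- ===== CLAIM (what is proved, stated in full; the proofs are below) =====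
def Claim_equal_solve : Prop := ∀ (paths : String) (n : Int), Dom_solve paths n → Pre_solve paths n → Spec_solve paths n (solve paths n)

-- ===== LEMMAS AND PROOFS =====

-- When no "**" occurs, A's loop falls through having counted the '@'s at indices 0..len-2.
lemma solveGo_no_stars (cs : List Char) (count : Int)
    (h : ¬ ['*', '*'] <:+: cs) :
    solveGo cs count = Sum.inr (count + (cs.dropLast.count '@' : Int)) := by
  induction cs generalizing count with
  | nil => simp [solveGo]
  | cons c1 tail ih =>
    cases tail with
    | nil => simp [solveGo]
    | cons c2 rest =>
      rw [List.infix_cons_iff] at h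
      push Not at h
      obtain ⟨hpre, hinf⟩ := h
      have hne : ¬ (c1 = '*' ∧ c2 = '*') := by
        rintro ⟨rfl, rfl⟩
        exact hpre ⟨rest, rfl⟩
      rw [List.dropLast_cons_of_ne_nil (by simp)]
      by_cases hc : c1 = '@'
      · simp only [solveGo, if_neg hne, if_pos hc, ih _ hinf]
        subst hc
        simp
        ring
      · simp only [solveGo, if_neg hne, if_neg hc, ih _ hinf]
        simp [hc]

-- When the first "**" starts at index m, A's loop returns early with the '@'-count of cs[:m].
lemma solveGo_stars (m : Nat) : ∀ (cs : List Char) (count : Int),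
    ['*', '*'] <+: cs.drop m →
    (∀ j < m, ¬ ['*', '*'] <+: cs.drop j) →
    solveGo cs count = Sum.inl (count + ((cs.take m).count '@' : Int)) := by
  induction m with
  | zero =>
    intro cs count hpre _
    obtain ⟨t, ht⟩ := hpre
    simp only [List.drop_zero] at ht
    subst ht
    simp [solveGo]
  | succ m ih =>
    intro cs count hpre hmin
    match cs with
    | [] => simp at hpre
    | [c] =>
      exfalso
      have := hpre.length_le
      simp at this
    | c1 :: c2 :: rest =>
      have h0 := hmin 0 (Nat.succ_pos m)
      simp only [List.drop_zero] at h0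
      have hne : ¬ (c1 = '*' ∧ c2 = '*') := by
        rintro ⟨rfl, rfl⟩
        exact h0 ⟨rest, rfl⟩
      have hpre' : ['*', '*'] <+: (c2 :: rest).drop m := hpre
      have hmin' : ∀ j < m, ¬ ['*', '*'] <+: (c2 :: rest).drop j := by
        intro j hj
        exact hmin (j + 1) (by omega)
      by_cases hc : c1 = '@'
      · simp only [solveGo, if_neg hne, if_pos hc, ih _ _ hpre' hmin']
        subst hc
        simp
        ring
      · simp only [solveGo, if_neg hne, if_neg hc, ih _ _ hpre' hmin']
        simp [hc]

-- ===== VERDICT (by name: the statement is the Claim_ definition above) =====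
theorem solve_spec : Claim_equal_solve := by
  intro paths n _ hpre
  unfold Spec_solve solve solve_alt
  have hcs : paths.toList ≠ [] := by
    intro h
    exact hpre (String.toList_eq_nil_iff.mp h)
  set cs := paths.toList with hcsdef
  have hsub : ("**" : String).toList = ['*', '*'] := by decide
  by_cases hfind : PySem.Chars.find cs ['*', '*'] = -1
  · -- no "**": A falls through the loop and checks the last character
    have hninf : ¬ ['*', '*'] <:+: cs := (PySem.Chars.find_eq_neg_one_iff cs _).mp hfind
    rw [solveGo_no_stars cs 0 hninf]
    have hget : PySem.Str.pyGet? paths (-1) = some (cs.getLast hcs) := by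
      rw [PySem.Str.pyGet?_eq, PySem.Chars.pyGet?_eq_listPyGet?, ← hcsdef]
      match cs, hcs with
      | c :: t, h =>
        simp [PySem.List.pyGet?, PySem.List.pyIdx?, List.getLast_eq_getElem]
        rfl
    have hfneg : ¬ (PySem.Str.find paths "**" ≠ -1) := by
      simp [PySem.Str.find_eq, hsub, ← hcsdef, hfind]
    rw [if_neg hfneg]
    simp only [hget]
    conv_rhs => rw [← List.dropLast_concat_getLast hcs]
    rw [List.count_append]
    by_cases hat : cs.getLast hcs = '@'
    · simp [hat]
    · simp [hat]
  · -- "**" found at index idx = find cs "**": A returns early with the count of cs[:idx]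
    have h0 : 0 ≤ PySem.Chars.find cs ['*', '*'] := by
      have := PySem.Chars.neg_one_le_find cs ['*', '*']
      omega
    obtain ⟨hp, hmin⟩ := PySem.Chars.find_spec h0
    rw [solveGo_stars (PySem.Chars.find cs ['*', '*']).toNat cs 0 hp hmin]
    have hfpos : PySem.Str.find paths "**" ≠ -1 := by
      simp [PySem.Str.find_eq, hsub, ← hcsdef, hfind]
    rw [if_pos hfpos]
    have hslice : (PySem.Str.slice paths none (some (PySem.Str.find paths "**"))).toList
        = cs.take (PySem.Chars.find cs ['*', '*']).toNat := by
      rw [PySem.Str.toList_slice, PySem.Chars.slice_eq_listSlice, ← hcsdef,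
        PySem.Str.find_eq, hsub, ← hcsdef, PySem.List.slice_to _ h0]
    rw [hslice]
    simp
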